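-- pv_equiv track=rewrite | github.com/anvita-a/Culturally-aware-multilingual-translator-2 | pipeline/profanity_flagger.py | _scan_terms
-- ===== SOURCE A (Python) =====
-- def _scan_terms(text_lower: str, words: set, term_list: list) -> list:
--     """Check text against a list of terms, handling both single and multi-word."""
--     found = []
--     for term in term_list:
--         if " " in term:
--             if term in text_lower:
--                 found.append(term)
--         elif term in words:
--             found.append(term)
--     return found
-- ===== SOURCE B (Python) =====
-- def _scan_terms(text_lower: str, words: set, term_list: list) -> list:
--     """Text-major scan: slide once over every start position of the text and
--     match all multi-word terms there by explicit prefix comparison (instead of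
--     one substring search per term); then emit hits in term_list order, with
--     single-word terms answered by the words set."""
--     multis = [t for t in term_list if " " in t]
--     hit = set()
--     for i in range(len(text_lower)):
--         for t in multis:
--             if t not in hit and text_lower.startswith(t, i):
--                 hit.add(t)
--     return [t for t in term_list
--             if (t in hit if " " in t else t in words)]
-- ===== Notes on version B (the rewrite author's own statement) =====
-- stated objective: alternative
-- what changed: Inverts the traversal: instead of A's term-major loop running one substring search per multi-word term, B slides once over the text's start positions matching all multi-word terms by explicit prefix comparison into a hit set, then emits matches in term_list order.
import Mathlib
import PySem

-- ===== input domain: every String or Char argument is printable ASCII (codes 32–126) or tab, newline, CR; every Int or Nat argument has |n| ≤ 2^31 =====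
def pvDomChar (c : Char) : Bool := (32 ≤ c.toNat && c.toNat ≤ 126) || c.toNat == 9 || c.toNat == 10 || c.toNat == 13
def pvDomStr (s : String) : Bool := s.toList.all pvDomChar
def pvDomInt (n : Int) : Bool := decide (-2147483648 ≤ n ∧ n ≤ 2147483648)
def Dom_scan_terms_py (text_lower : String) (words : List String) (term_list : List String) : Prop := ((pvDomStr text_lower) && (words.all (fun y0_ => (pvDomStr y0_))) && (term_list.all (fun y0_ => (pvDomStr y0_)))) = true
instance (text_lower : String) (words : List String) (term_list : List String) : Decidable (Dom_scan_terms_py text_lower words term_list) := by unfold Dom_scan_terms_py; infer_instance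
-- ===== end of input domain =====

-- B inverts the traversal: one slide over the text's start positions matching all
-- multi-word terms by explicit prefix comparison into a hit set, then one pass over
-- term_list to emit matches in order (objective: alternative structure, same result).

-- ===== PORT A =====
def scan_terms_py (text_lower : String) (words : List String) (term_list : List String) : List String :=
  term_list.foldl (fun found term =>
    if PySem.Str.isIn " " term then
      (if PySem.Str.isIn term text_lower then found ++ [term] else found)
    else
      (if PySem.Set.contains words term then found ++ [term] else found)) []

-- ===== PORT B =====
-- range(len(text_lower)) is List.range over the character count; Python's
-- text_lower.startswith(t, i) with 0 ≤ i is exactly 't.toList isPrefixOf (chars dropped by i)'.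
def scan_terms_py_alt (text_lower : String) (words : List String) (term_list : List String) : List String :=
  let multis := term_list.filter (fun t => PySem.Str.isIn " " t)
  let cs := text_lower.toList
  let hit : PySem.Set String :=
    (List.range cs.length).foldl (fun hit i =>
      multis.foldl (fun hit t =>
        if !PySem.Set.contains hit t && t.toList.isPrefixOf (cs.drop i)
        then PySem.Set.add hit t else hit) hit)
      PySem.Set.empty
  term_list.filter (fun t =>
    if PySem.Str.isIn " " t then PySem.Set.contains hit t else PySem.Set.contains words t)

-- ===== PRECONDITION & SPEC =====
def Spec_scan_terms_py (text_lower : String) (words : List String) (term_list : List String) (out : List String) : Prop := out = scan_terms_py_alt text_lower words term_list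
instance (text_lower : String) (words : List String) (term_list : List String) (out : List String) : Decidable (Spec_scan_terms_py text_lower words term_list out) := by unfold Spec_scan_terms_py; infer_instance

-- ===== CLAIM (what is proved, stated in full; the proofs are below) =====
def Claim_equal_scan_terms_py : Prop := ∀ (text_lower : String) (words : List String) (term_list : List String), Dom_scan_terms_py text_lower words term_list → Spec_scan_terms_py text_lower words term_list (scan_terms_py text_lower words term_list)

-- ===== LEMMAS AND PROOFS =====

-- A's combined per-term test, as one boolean predicate.
def pvHit (text_lower : String) (words : List String) (t : String) : Bool :=
  if PySem.Str.isIn " " t then PySem.Str.isIn t text_lower else PySem.Set.contains words t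

-- A's fold is the filter of term_list by pvHit.
theorem scan_terms_py_eq_filter (text_lower : String) (words : List String) (term_list : List String) :
    scan_terms_py text_lower words term_list = term_list.filter (pvHit text_lower words) := by
  unfold scan_terms_py
  have hfun : (fun (found : List String) (term : String) =>
      if PySem.Str.isIn " " term then
        (if PySem.Str.isIn term text_lower then found ++ [term] else found)
      else
        (if PySem.Set.contains words term then found ++ [term] else found))
      = fun found term => if pvHit text_lower words term then found ++ [term] else found := by
    funext found term
    unfold pvHit
    split_ifs <;> simp_all
  rw [hfun, PySem.List.foldl_append_if_eq_filter]
  simp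

-- isPrefixOf is the decision procedure of the prefix relation.
theorem isPrefixOf_eq_decide (l m : List Char) : l.isPrefixOf m = decide (l <+: m) := by
  by_cases h : l <+: m
  · simp [h, List.isPrefixOf_iff_prefix]
  · simp only [h, decide_false]
    rw [Bool.eq_false_iff]
    simp [List.isPrefixOf_iff_prefix, h]

-- B's inner loop: membership in the hit set after scanning all terms at one position.
theorem inner_contains (P : String → Bool) (multis : List String) (s : PySem.Set String) (t : String) :
    PySem.Set.contains (multis.foldl (fun h u => if !PySem.Set.contains h u && P u then PySem.Set.add h u else h) s) t
      = (PySem.Set.contains s t || (decide (t ∈ multis) && P t)) := by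
  induction multis generalizing s with
  | nil => simp
  | cons u tl ih =>
    simp only [List.foldl_cons, ih]
    by_cases htu : t = u <;> by_cases hc : PySem.Set.contains s u = true <;>
      by_cases hp : P u = true <;> simp_all [PySem.Set.contains]

-- B's outer loop: t is in the hit set iff it was there already, or it is a listed
-- multi-word term matching at some start position i < n.
theorem outer_contains (cs : List Char) (multis : List String) (n : Nat) (s : PySem.Set String) (t : String) :
    PySem.Set.contains ((List.range n).foldl (fun h i =>
        multis.foldl (fun h u => if !PySem.Set.contains h u && u.toList.isPrefixOf (cs.drop i) then PySem.Set.add h u else h) h) s) t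
      = (PySem.Set.contains s t || (decide (t ∈ multis) && decide (∃ i < n, t.toList <+: cs.drop i))) := by
  induction n generalizing s with
  | zero => simp
  | succ n ih =>
    rw [List.range_succ, List.foldl_append]
    simp only [List.foldl_cons, List.foldl_nil]
    rw [inner_contains, ih]
    have hsplit : (∃ i < n+1, t.toList <+: cs.drop i) ↔ (∃ i < n, t.toList <+: cs.drop i) ∨ t.toList <+: cs.drop n := by
      constructor
      · rintro ⟨i, hi, h⟩
        rcases Nat.lt_succ_iff_lt_or_eq.mp hi with h' | rfl
        exacts [Or.inl ⟨i, h', h⟩, Or.inr h]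
      · rintro (⟨i, hi, h⟩ | h)
        exacts [⟨i, Nat.lt_succ_of_lt hi, h⟩, ⟨n, Nat.lt_succ_self n, h⟩]
    rw [show decide (∃ i < n+1, t.toList <+: cs.drop i)
          = (decide (∃ i < n, t.toList <+: cs.drop i) || decide (t.toList <+: cs.drop n)) by
        rw [decide_eq_decide.mpr hsplit]; exact Bool.decide_or _ _]
    rw [isPrefixOf_eq_decide, Bool.and_or_distrib_left, Bool.or_assoc]

-- For a nonempty pattern, matching at some position i < length is Python's 'sub in s'.
theorem exists_lt_iff_isIn (s t : String) (hne : t.toList ≠ []) :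
    decide (∃ i < s.toList.length, t.toList <+: s.toList.drop i) = PySem.Str.isIn t s := by
  have h1 : (∃ i < s.toList.length, t.toList <+: s.toList.drop i) ↔ (∃ j, t.toList <+: s.toList.drop j) := by
    constructor
    · rintro ⟨i, _, h⟩; exact ⟨i, h⟩
    · rintro ⟨j, h⟩
      by_cases hj : j < s.toList.length
      · exact ⟨j, hj, h⟩
      · exact absurd (List.prefix_nil.mp
          ((List.drop_eq_nil_of_le (Nat.le_of_not_lt hj)) ▸ h)) hne
  have h2 := PySem.Chars.exists_prefix_drop_iff_isIn t.toList s.toList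
  by_cases h : (∃ j, t.toList <+: s.toList.drop j) <;> simp_all [PySem.Str.isIn]

-- A term containing " " has a nonempty character list.
theorem toList_ne_nil_of_space (t : String) (h : PySem.Str.isIn " " t = true) : t.toList ≠ [] := by
  intro hnil
  have h' : PySem.Chars.isIn " ".toList t.toList = true := by simpa using h
  rw [hnil] at h'
  exact absurd h' (by decide)

-- ===== VERDICT (by name: the statement is the Claim_ definition above) =====
theorem scan_terms_py_spec : Claim_equal_scan_terms_py := by
  intro text_lower words term_list _
  unfold Spec_scan_terms_py scan_terms_py_alt
  rw [scan_terms_py_eq_filter]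
  refine List.filter_congr (fun t ht => ?_)
  unfold pvHit
  by_cases hsp : PySem.Str.isIn " " t = true
  · rw [if_pos hsp, if_pos hsp, outer_contains]
    have hne := toList_ne_nil_of_space t hsp
    have hsp' : PySem.Chars.isIn [' '] t.toList = true := by simpa using hsp
    rw [exists_lt_iff_isIn text_lower t hne]
    simp [PySem.Set.contains, PySem.Set.empty, ht, hsp']
  · rw [if_neg hsp, if_neg hsp]
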